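-- pv_equiv track=rewrite | github.com/panhongxing-sds/robust-optimization | sturt/python_scripts/eval_section3_assortment.py | all_candidate_assortments
-- ===== SOURCE A (Python) =====
-- import itertools
-- from typing import Dict, List, Sequence, Tuple
--
-- def all_candidate_assortments(n: int) -> List[List[int]]:
--     # Match section_3 filtering: assortment must contain outside option 0 and product n
--     out = []
--     universe = list(range(n + 1))
--     for k in range(n + 2):
--         for s in itertools.combinations(universe, k):
--             if 0 in s and n in s:
--                 out.append(list(s))
--     return out
-- ===== SOURCE B (Python) =====
-- import itertools
-- from typing import List
--
-- def all_candidate_assortments(n: int) -> List[List[int]]: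
--     # Fix the mandatory elements 0 and n and enumerate only middles from {1,..,n-1}.
--     if n < 0:
--         return []
--     if n == 0:
--         return [[0]]
--     out = []
--     for j in range(n):
--         for m in itertools.combinations(range(1, n), j):
--             out.append([0] + list(m) + [n])
--     return out
-- ===== Notes on version B (the rewrite author's own statement) =====
-- stated objective: simpler
-- what changed: Instead of generating every subset of the universe at each size and filtering those containing the outside option and the last product, B fixes those two mandatory elements and directly enumerates only the middle subsets, so no filtering branch and no discarded subsets (trivial small cases handled directly).
import Mathlib
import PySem

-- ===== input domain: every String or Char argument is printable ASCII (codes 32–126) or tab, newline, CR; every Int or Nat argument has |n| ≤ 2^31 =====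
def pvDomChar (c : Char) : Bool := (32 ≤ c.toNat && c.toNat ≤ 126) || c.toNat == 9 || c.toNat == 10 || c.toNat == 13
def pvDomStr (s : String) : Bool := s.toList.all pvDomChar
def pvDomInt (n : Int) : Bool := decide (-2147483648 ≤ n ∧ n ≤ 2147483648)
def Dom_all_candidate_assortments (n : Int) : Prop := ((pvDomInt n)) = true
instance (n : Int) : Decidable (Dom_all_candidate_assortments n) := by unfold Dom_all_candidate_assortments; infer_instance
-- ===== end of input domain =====

-- B drops A's generate-all-then-filter: it fixes the mandatory elements 0 and n and
-- enumerates only the middles from {1,…,n-1} (objective: simpler, no filtering branch).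

-- ===== PORT A =====
-- literal transliteration of A: for k in range(n+2), for s in combinations(universe, k),
-- append list(s) if 0 in s and n in s.  (k ranges over nonnegative ints, so k.toNat is exact.)
def all_candidate_assortments (n : Int) : List (List Int) :=
  let univ := PySem.List.pyRange 0 (n + 1) 1
  (PySem.List.pyRange 0 (n + 2) 1).foldl (fun out k =>
    (PySem.List.combinations univ k.toNat).foldl (fun out s =>
      if s.contains 0 && s.contains n then out ++ [s] else out) out) []

-- ===== PORT B =====
-- literal transliteration of Source B: special cases n<0, n==0; else for j in range(n),
-- for m in combinations(range(1,n), j), append [0]+list(m)+[n].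
def all_candidate_assortments_alt (n : Int) : List (List Int) :=
  if n < 0 then []
  else if n = 0 then [[0]]
  else
    (PySem.List.pyRange 0 n 1).foldl (fun out j =>
      (PySem.List.combinations (PySem.List.pyRange 1 n 1) j.toNat).foldl (fun out m =>
        out ++ [0 :: m ++ [n]]) out) []

-- ===== PRECONDITION & SPEC =====
def Spec_all_candidate_assortments (n : Int) (out : List (List Int)) : Prop := out = all_candidate_assortments_alt n
instance (n : Int) (out : List (List Int)) : Decidable (Spec_all_candidate_assortments n out) := by unfold Spec_all_candidate_assortments; infer_instance

-- ===== CLAIM (what is proved, stated in full; the proofs are below) =====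
def Claim_equal_all_candidate_assortments : Prop := ∀ (n : Int), Dom_all_candidate_assortments n → Spec_all_candidate_assortments n (all_candidate_assortments n)

-- ===== LEMMAS AND PROOFS =====

-- an element absent from the base list is absent from every combination of it
theorem pv_not_mem {α : Type} [DecidableEq α] {xs s : List α} {r : Nat} {a : α}
    (hs : s ∈ PySem.List.combinations xs r) (ha : a ∉ xs) : a ∉ s :=
  fun h => ha ((PySem.List.sublist_of_mem_combinations hs).subset h)

-- filtering combinations for an element absent from the base list yields nothing
theorem pv_filter_absent {α : Type} [DecidableEq α] (xs : List α) (r : Nat) (a : α)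
    (q : List α → Bool) (ha : a ∉ xs) :
    (PySem.List.combinations xs r).filter (fun s => s.contains a && q s) = [] := by
  apply List.filter_eq_nil_iff.mpr
  intro s hs
  simp [List.contains_eq_mem, pv_not_mem hs ha]

-- a 'contains b' filter commutes with consing a head x ≠ b
theorem pv_filter_map_cons {α : Type} [DecidableEq α] (x b : α) (l : List (List α))
    (hxb : x ≠ b) :
    (l.map (x :: ·)).filter (fun s => s.contains b) = (l.filter (fun s => s.contains b)).map (x :: ·) := by
  rw [List.filter_map]
  congr 1
  apply List.filter_congr
  intro s _
  simp [List.contains_eq_mem, hxb.symm]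

-- combinations of xs ++ [b] containing b are exactly the combinations of xs with b appended
theorem pv_filter_last {α : Type} [DecidableEq α] (b : α) (xs : List α) (r : Nat)
    (hb : b ∉ xs) :
    (PySem.List.combinations (xs ++ [b]) (r + 1)).filter (fun s => s.contains b)
      = (PySem.List.combinations xs r).map (· ++ [b]) := by
  induction xs generalizing r with
  | nil =>
    cases r with
    | zero => simp [PySem.List.combinations_cons_succ, PySem.List.combinations_zero,
        PySem.List.combinations_nil_succ]
    | succ r' => simp [PySem.List.combinations_cons_succ, PySem.List.combinations_nil_succ]
  | cons x xs' ih =>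
    have hxb : x ≠ b := fun h => hb (h ▸ List.mem_cons_self)
    have hb' : b ∉ xs' := fun h => hb (List.mem_cons_of_mem _ h)
    rw [List.cons_append, PySem.List.combinations_cons_succ, List.filter_append,
        pv_filter_map_cons x b _ hxb, ih r hb']
    cases r with
    | zero =>
      simp [PySem.List.combinations_zero]
    | succ r' =>
      rw [ih r' hb', PySem.List.combinations_cons_succ, List.map_append, List.map_map, List.map_map]
      rfl

-- size-(j+2) combinations of a :: xs ++ [b] containing both a and b are a :: (middle) ++ [b]
theorem pv_main {α : Type} [DecidableEq α] (a b : α) (xs : List α)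
    (ha : a ∉ xs) (hb : b ∉ xs) (hab : a ≠ b) (j : Nat) :
    (PySem.List.combinations (a :: (xs ++ [b])) (j + 2)).filter
        (fun s => s.contains a && s.contains b)
      = (PySem.List.combinations xs j).map (fun m => a :: (m ++ [b])) := by
  have ha' : a ∉ xs ++ [b] := by simp [ha, hab]
  rw [show j + 2 = (j + 1) + 1 from rfl, PySem.List.combinations_cons_succ, List.filter_append,
      pv_filter_absent _ _ a _ ha', List.filter_map]
  have hcomp : ((fun s : List α => s.contains a && s.contains b) ∘ (a :: ·))
      = fun s : List α => s.contains b := by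
    funext s
    simp only [Function.comp, List.contains_eq_mem, List.mem_cons]
    simp [Ne.symm hab]
  rw [hcomp, pv_filter_last b xs j hb, List.map_map, List.append_nil]
  rfl

theorem pv_k0 {α : Type} [DecidableEq α] (a b : α) (l : List α) :
    (PySem.List.combinations l 0).filter (fun s => s.contains a && s.contains b) = [] := by
  simp [PySem.List.combinations_zero]

theorem pv_k1 {α : Type} [DecidableEq α] (a b : α) (l : List α) (hab : a ≠ b) :
    (PySem.List.combinations l 1).filter (fun s => s.contains a && s.contains b) = [] := by
  rw [PySem.List.combinations_one]
  apply List.filter_eq_nil_iff.mpr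
  intro s hs
  simp only [List.mem_map] at hs
  obtain ⟨x, _, rfl⟩ := hs
  simp only [List.contains_eq_mem, List.mem_singleton, Bool.and_eq_true, decide_eq_true_eq, not_and]
  intro h1 h2
  exact hab (h1 ▸ h2 ▸ rfl)

-- A's double loop is a flatMap of filtered combinations
theorem pv_A_eq (n : Int) : all_candidate_assortments n =
    (PySem.List.pyRange 0 (n + 2) 1).flatMap (fun k =>
      (PySem.List.combinations (PySem.List.pyRange 0 (n + 1) 1) k.toNat).filter
        (fun s => s.contains 0 && s.contains n)) := by
  unfold all_candidate_assortments
  simp only [PySem.List.foldl_append_if_eq_filter]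
  rw [PySem.List.foldl_append_eq_flatMap]
  simp

-- B's double loop (n ≥ 1) is a flatMap of mapped combinations
theorem pv_B_eq (n : Int) (h : 1 ≤ n) : all_candidate_assortments_alt n =
    (PySem.List.pyRange 0 n 1).flatMap (fun j =>
      (PySem.List.combinations (PySem.List.pyRange 1 n 1) j.toNat).map
        (fun m => 0 :: (m ++ [n]))) := by
  unfold all_candidate_assortments_alt
  rw [if_neg (by omega), if_neg (by omega)]
  simp only [PySem.List.foldl_append_singleton_eq_map]
  rw [PySem.List.foldl_append_eq_flatMap]
  simp

theorem pv_pos (n : Int) (h : 1 ≤ n) :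
    all_candidate_assortments n = all_candidate_assortments_alt n := by
  have h0 : (0:Int) ∉ PySem.List.pyRange 1 n 1 := by
    simp [PySem.List.mem_pyRange_one]
  have hn : n ∉ PySem.List.pyRange 1 n 1 := by
    simp [PySem.List.mem_pyRange_one]
  have hab : (0:Int) ≠ n := by omega
  rw [pv_A_eq, pv_B_eq n h]
  have huniv : PySem.List.pyRange 0 (n + 1) 1
      = 0 :: (PySem.List.pyRange 1 n 1 ++ [n]) := by
    rw [PySem.List.pyRange_one_cons (by omega), PySem.List.pyRange_one_succ_right (by omega)]
    norm_num
  rw [huniv]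
  rw [PySem.List.pyRange_one_cons (a := 0) (b := n + 2) (by omega)]
  rw [show (0:Int) + 1 = 1 by norm_num]
  rw [PySem.List.pyRange_one_cons (a := 1) (b := n + 2) (by omega)]
  rw [show (1:Int) + 1 = 2 by norm_num]
  rw [List.flatMap_cons, List.flatMap_cons,
      show ((0:Int).toNat) = 0 from rfl, show ((1:Int).toNat) = 1 from rfl,
      pv_k0, pv_k1 (0:Int) n _ hab, List.nil_append, List.nil_append]
  rw [PySem.List.pyRange_one (a := 2) (b := n + 2), PySem.List.pyRange_one (a := 0) (b := n)]
  have : (n + 2 - 2).toNat = (n - 0).toNat := by omega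
  rw [this, List.flatMap_map, List.flatMap_map]
  apply List.flatMap_congr
  intro j _
  rw [show ((2:Int) + (j:Int)).toNat = j + 2 by omega, show ((0:Int) + (j:Int)).toNat = j by omega]
  exact pv_main 0 n _ h0 hn hab j

-- ===== VERDICT (by name: the statement is the Claim_ definition above) =====
theorem all_candidate_assortments_spec : Claim_equal_all_candidate_assortments := by
  intro n _
  show all_candidate_assortments n = all_candidate_assortments_alt n
  rcases lt_trichotomy n 0 with hlt | rfl | hgt
  · by_cases h1 : n = -1
    · subst h1; decide
    · unfold all_candidate_assortments all_candidate_assortments_alt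
      rw [PySem.List.pyRange_one_eq_nil (a := 0) (b := n + 2) (by omega), if_pos hlt]
      rfl
  · decide
  · exact pv_pos n (by omega)
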